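-- pv_equiv track=rewrite | github.com/bernatbellmunt/ironh_project1 | src/cleaning.py | create_season
-- ===== SOURCE A (Python) =====
-- def create_season (hemis,month):
--     season_list = []
--     list_hemis = list(hemis)
--     list_month = list(month)
--
--     for h,m in zip(list_hemis,list_month):
--         if h == "NORTH":
--             if m in range(1,4):
--                 season_list.append("WINTER")
--             elif m in range(4,7):
--                 season_list.append("SPRING")
--             elif m in range(7,10):
--                 season_list.append("SUMMER")
--             elif m in range(10,13):
--                 season_list.append("AUTUMN")
--             else:
--                 season_list.append("NOT DEFINED")
--
--         elif h == "SOUTH":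
--             if m in range(1,4):
--                 season_list.append("SUMMER")
--             elif m in range(4,7):
--                 season_list.append("AUTUMN")
--             elif m in range(7,10):
--                 season_list.append("WINTER")
--             elif m in range(10,13):
--                 season_list.append("SPRING")
--             else:
--                 season_list.append("NOT DEFINED")
--     return season_list
-- ===== SOURCE B (Python) =====
-- _SEASONS = ("WINTER", "SPRING", "SUMMER", "AUTUMN")
--
--
-- def create_season(hemis, month):
--     out = []
--     for h, m in zip(hemis, month):
--         if h == "NORTH":
--             off = 0
--         elif h == "SOUTH":
--             off = 2
--         else:
--             continue
--         if 1 <= m <= 12: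
--             out.append(_SEASONS[((m - 1) // 3 + off) % 4])
--         else:
--             out.append("NOT DEFINED")
--     return out
-- ===== Notes on version B (the rewrite author's own statement) =====
-- stated objective: alternative
-- what changed: A's two four-branch range ladders are replaced by closed-form arithmetic: after a 1<=m<=12 validity check the season is computed as SEASONS[((m-1)//3 + offset) % 4] with hemisphere offset 0 (NORTH) / 2 (SOUTH), keeping A's skip of unknown hemispheres.
import Mathlib
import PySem

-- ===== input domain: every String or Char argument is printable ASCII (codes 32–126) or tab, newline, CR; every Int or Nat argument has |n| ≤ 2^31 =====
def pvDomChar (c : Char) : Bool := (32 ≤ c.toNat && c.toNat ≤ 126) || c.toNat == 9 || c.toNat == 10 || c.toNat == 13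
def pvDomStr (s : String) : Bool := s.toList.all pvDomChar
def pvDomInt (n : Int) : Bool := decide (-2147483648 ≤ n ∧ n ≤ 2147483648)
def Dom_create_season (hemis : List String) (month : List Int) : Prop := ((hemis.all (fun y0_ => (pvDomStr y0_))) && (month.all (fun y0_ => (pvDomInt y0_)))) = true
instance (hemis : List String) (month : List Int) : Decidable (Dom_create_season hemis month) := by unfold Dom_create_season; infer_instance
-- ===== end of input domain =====

-- B replaces A's two four-branch range ladders by closed-form arithmetic: season index
-- ((m-1)//3 + hemisphere offset) % 4 into a 4-element season list (objective: alternative; not faster).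

-- ===== PORT A =====
-- the loop body of A's for-loop (branches in A's order)
def stepA (season_list : List String) (hm : String × Int) : List String :=
  if hm.1 = "NORTH" then
    if 1 ≤ hm.2 ∧ hm.2 < 4 then season_list ++ ["WINTER"]
    else if 4 ≤ hm.2 ∧ hm.2 < 7 then season_list ++ ["SPRING"]
    else if 7 ≤ hm.2 ∧ hm.2 < 10 then season_list ++ ["SUMMER"]
    else if 10 ≤ hm.2 ∧ hm.2 < 13 then season_list ++ ["AUTUMN"]
    else season_list ++ ["NOT DEFINED"]
  else if hm.1 = "SOUTH" then
    if 1 ≤ hm.2 ∧ hm.2 < 4 then season_list ++ ["SUMMER"]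
    else if 4 ≤ hm.2 ∧ hm.2 < 7 then season_list ++ ["AUTUMN"]
    else if 7 ≤ hm.2 ∧ hm.2 < 10 then season_list ++ ["WINTER"]
    else if 10 ≤ hm.2 ∧ hm.2 < 13 then season_list ++ ["SPRING"]
    else season_list ++ ["NOT DEFINED"]
  else season_list

def create_season (hemis : List String) (month : List Int) : List String :=
  (List.zip hemis month).foldl stepA []

-- ===== PORT B =====
def SEASONS : List String := ["WINTER", "SPRING", "SUMMER", "AUTUMN"]

-- the loop body of Source B's for-loop: hemisphere offset, then arithmetic season index
def stepB (out : List String) (hm : String × Int) : List String :=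
  match (if hm.1 = "NORTH" then some (0 : Int)
         else if hm.1 = "SOUTH" then some 2 else none) with
  | none => out            -- 'continue'
  | some off =>
    if 1 ≤ hm.2 ∧ hm.2 ≤ 12 then
      -- _SEASONS[((m - 1) // 3 + off) % 4]; the index is provably in 0..3, pyGet? is some
      out ++ (PySem.List.pyGet? SEASONS
        (PySem.Int.mod (PySem.Int.floordiv (hm.2 - 1) 3 + off) 4)).toList
    else out ++ ["NOT DEFINED"]

def create_season_alt (hemis : List String) (month : List Int) : List String :=
  (List.zip hemis month).foldl stepB []

-- ===== PRECONDITION & SPEC =====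
def Spec_create_season (hemis : List String) (month : List Int) (out : List String) : Prop := out = create_season_alt hemis month
instance (hemis : List String) (month : List Int) (out : List String) : Decidable (Spec_create_season hemis month out) := by unfold Spec_create_season; infer_instance

-- ===== CLAIM =====
def Claim_equal_create_season : Prop := ∀ (hemis : List String) (month : List Int), Dom_create_season hemis month → Spec_create_season hemis month (create_season hemis month)

-- ===== LEMMAS AND PROOFS =====

theorem stepB_season (out : List String) (h : String) (m : Int) (off : Int)
    (hoff : (if h = "NORTH" then some (0 : Int)
             else if h = "SOUTH" then some 2 else none) = some off)
    (hm : 1 ≤ m ∧ m ≤ 12) :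
    stepB out (h, m) = out ++ (PySem.List.pyGet? SEASONS
      (PySem.Int.mod (PySem.Int.floordiv (m - 1) 3 + off) 4)).toList := by
  simp [stepB, hoff, hm]

theorem step_eq (acc : List String) (hm : String × Int) :
    stepA acc hm = stepB acc hm := by
  obtain ⟨h, m⟩ := hm
  by_cases hn : h = "NORTH"
  · subst hn
    by_cases hr : 1 ≤ m ∧ m ≤ 12
    · rw [stepB_season acc _ m 0 (by simp) hr]
      obtain ⟨hl, hu⟩ := hr
      interval_cases m <;> (norm_num [stepA]; rfl)
    · simp only [stepA, stepB, if_neg hr]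
      split_ifs <;> first | rfl | omega
  · by_cases hs : h = "SOUTH"
    · subst hs
      by_cases hr : 1 ≤ m ∧ m ≤ 12
      · rw [stepB_season acc _ m 2 (by simp [hn]) hr]
        obtain ⟨hl, hu⟩ := hr
        interval_cases m <;> (norm_num [stepA]; rfl)
      · simp only [stepA, stepB, if_neg hn, if_neg hr]
        split_ifs <;> first | rfl | omega
    · simp [stepA, stepB, hn, hs]

-- ===== VERDICT =====
theorem create_season_spec : Claim_equal_create_season := by
  intro hemis month _
  unfold Spec_create_season create_season create_season_alt
  have hf : stepA = stepB := funext fun a => funext fun x => step_eq a x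
  rw [hf]
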